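-- pv_equiv track=rewrite | github.com/MKWB/RaspberryFluke | parse_utils.py | shorten_interface_name
-- ===== SOURCE A (Python) =====
-- def shorten_interface_name(port_name: str) -> str:
--     """
--     Shorten long interface names to something that fits better on the display.
--
--     Examples:
--         GigabitEthernet1/0/24 -> Gi1/0/24
--         TenGigabitEthernet1/1/1 -> Te1/1/1
--         FastEthernet0/1 -> Fa0/1
--
--     If no known long prefix is found, the original value is returned.
--     """
--     if not port_name:
--         return ""
--
--     replacements = [
--         ("TwentyFiveGigabitEthernet", "Twe"),
--         ("TwentyFiveGigE", "Twe"),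
--         ("FortyGigabitEthernet", "Fo"),
--         ("HundredGigabitEthernet", "Hu"),
--         ("HundredGigE", "Hu"),
--         ("TenGigabitEthernet", "Te"),
--         ("GigabitEthernet", "Gi"),
--         ("FastEthernet", "Fa"),
--         ("Port-channel", "Po"),
--         ("Port-Channel", "Po"),
--         ("Ethernet", "Eth"),
--     ]
--
--     for long_name, short_name in replacements:
--         if port_name.startswith(long_name):
--             return port_name.replace(long_name, short_name, 1)
--
--     return port_name
-- ===== SOURCE B (Python) =====
-- # B: compile the prefix table once into a trie (DFA) over (state, char) transitions,
-- # then match with a single left-to-right pass over port_name instead of trying each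
-- # prefix with startswith.  Correct because no listed prefix is a prefix of another,
-- # so the first accepting state reached corresponds to the unique matching prefix.
--
-- _REPLACEMENTS = [
--     ("TwentyFiveGigabitEthernet", "Twe"),
--     ("TwentyFiveGigE", "Twe"),
--     ("FortyGigabitEthernet", "Fo"),
--     ("HundredGigabitEthernet", "Hu"),
--     ("HundredGigE", "Hu"),
--     ("TenGigabitEthernet", "Te"),
--     ("GigabitEthernet", "Gi"),
--     ("FastEthernet", "Fa"),
--     ("Port-channel", "Po"),
--     ("Port-Channel", "Po"),
--     ("Ethernet", "Eth"),
-- ]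
--
--
-- def _compile(patterns):
--     trans = {}
--     out = {}
--     n = 1
--     for long_name, short_name in patterns:
--         state = 0
--         for ch in long_name:
--             nxt = trans.get((state, ch))
--             if nxt is None:
--                 nxt = n
--                 trans[(state, ch)] = nxt
--                 n += 1
--             state = nxt
--         out[state] = short_name
--     return trans, out
--
--
-- _TRANS, _OUT = _compile(_REPLACEMENTS)
--
--
-- def shorten_interface_name(port_name: str) -> str:
--     state = 0
--     for i, ch in enumerate(port_name):
--         state = _TRANS.get((state, ch))
--         if state is None:
--             return port_name
--         short = _OUT.get(state)
--         if short is not None: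
--             return short + port_name[i + 1:]
--     return port_name
-- ===== Notes on version B (the rewrite author's own statement) =====
-- stated objective: alternative
-- what changed: Replaces the per-prefix startswith scan by compiling the eleven prefixes once into a trie (DFA) of (state, char) transitions and matching with a single left-to-right pass over port_name; correct because no listed prefix is a prefix of another, so the first accepting state reached identifies the unique matching prefix.
import Mathlib
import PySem

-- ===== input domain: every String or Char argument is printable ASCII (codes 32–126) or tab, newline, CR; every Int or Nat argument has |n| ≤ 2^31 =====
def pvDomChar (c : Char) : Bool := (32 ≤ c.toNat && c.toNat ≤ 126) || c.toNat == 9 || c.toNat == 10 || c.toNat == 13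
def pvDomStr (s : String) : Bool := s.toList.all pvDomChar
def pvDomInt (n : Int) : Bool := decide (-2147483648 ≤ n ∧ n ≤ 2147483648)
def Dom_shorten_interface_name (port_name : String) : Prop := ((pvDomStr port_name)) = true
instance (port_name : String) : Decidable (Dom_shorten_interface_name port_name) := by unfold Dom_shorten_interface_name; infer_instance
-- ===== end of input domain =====

-- B compiles the prefix table once into a trie of (state, char) transitions and
-- matches with a single left-to-right pass instead of trying each prefix with
-- startswith; alternative algorithm, same outputs.

-- ===== PORT A =====
-- the replacement table of A, in A's order (prefix/shorthand pairs as char lists)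
def pvReplacements : List (List Char × List Char) :=
  [("TwentyFiveGigabitEthernet".toList, "Twe".toList),
   ("TwentyFiveGigE".toList, "Twe".toList),
   ("FortyGigabitEthernet".toList, "Fo".toList),
   ("HundredGigabitEthernet".toList, "Hu".toList),
   ("HundredGigE".toList, "Hu".toList),
   ("TenGigabitEthernet".toList, "Te".toList),
   ("GigabitEthernet".toList, "Gi".toList),
   ("FastEthernet".toList, "Fa".toList),
   ("Port-channel".toList, "Po".toList),
   ("Port-Channel".toList, "Po".toList),
   ("Ethernet".toList, "Eth".toList)]

-- hand port of Python's s.replace(old, new, 1) (PySem.Chars.replace has no count):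
-- replace the FIRST occurrence of old (found with Chars.find, exactly Python's search)
-- and only that one; exact for every old, including old = [].
def pvReplaceOnce (s old new : List Char) : List Char :=
  let i := PySem.Chars.find s old
  if i = -1 then s
  else s.take i.toNat ++ new ++ s.drop (i.toNat + old.length)

-- A's for-loop with early return
def pvLoopA : List (List Char × List Char) → String → String
  | [], s => s
  | (l, sh) :: rest, s =>
    if PySem.Chars.startswith s.toList l then String.ofList (pvReplaceOnce s.toList l sh)
    else pvLoopA rest s

def shorten_interface_name (port_name : String) : String :=
  -- `if not port_name` = the empty string
  if port_name.toList = [] then ""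
  else pvLoopA pvReplacements port_name

-- ===== PORT B =====
-- Source B's _REPLACEMENTS table (B's own copy, in its order)
def pvPatterns : List (List Char × List Char) :=
  [("TwentyFiveGigabitEthernet".toList, "Twe".toList),
   ("TwentyFiveGigE".toList, "Twe".toList),
   ("FortyGigabitEthernet".toList, "Fo".toList),
   ("HundredGigabitEthernet".toList, "Hu".toList),
   ("HundredGigE".toList, "Hu".toList),
   ("TenGigabitEthernet".toList, "Te".toList),
   ("GigabitEthernet".toList, "Gi".toList),
   ("FastEthernet".toList, "Fa".toList),
   ("Port-channel".toList, "Po".toList),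
   ("Port-Channel".toList, "Po".toList),
   ("Ethernet".toList, "Eth".toList)]

-- one step of _compile's inner `for ch in long_name` loop; the folded state is
-- (trans, n, state) exactly as in Source B
def pvCompileStep (st : PySem.Dict (Nat × Char) Nat × Nat × Nat) (ch : Char) :
    PySem.Dict (Nat × Char) Nat × Nat × Nat :=
  match st.1.get? (st.2.2, ch) with
  | some nxt => (st.1, st.2.1, nxt)
  | none => (st.1.insert (st.2.2, ch) st.2.1, st.2.1 + 1, st.2.1)

-- _compile(patterns): outer loop over the patterns, returning (trans, out)
def pvCompile (patterns : List (List Char × List Char)) :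
    PySem.Dict (Nat × Char) Nat × PySem.Dict Nat (List Char) :=
  let st := patterns.foldl
    (fun (acc : PySem.Dict (Nat × Char) Nat × PySem.Dict Nat (List Char) × Nat) p =>
      let inner := p.1.foldl pvCompileStep (acc.1, acc.2.2, 0)
      (inner.1, acc.2.1.insert inner.2.2 p.2, inner.2.1))
    (PySem.Dict.empty, PySem.Dict.empty, 1)
  (st.1, st.2.1)

-- _TRANS, _OUT = _compile(_REPLACEMENTS)
def pvTrans : PySem.Dict (Nat × Char) Nat := (pvCompile pvPatterns).1
def pvOut : PySem.Dict Nat (List Char) := (pvCompile pvPatterns).2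

-- the `for i, ch in enumerate(port_name)` loop of B; `none` = a `return port_name`
-- site (transition missing, or string exhausted), `some r` = `return short + rest`
def pvRunB (trans : PySem.Dict (Nat × Char) Nat) (out : PySem.Dict Nat (List Char))
    (state : Nat) : List Char → Option (List Char)
  | [] => none
  | ch :: rest =>
    match trans.get? (state, ch) with
    | none => none
    | some st' =>
      match out.get? st' with
      | some short => some (short ++ rest)
      | none => pvRunB trans out st' rest

def shorten_interface_name_alt (port_name : String) : String :=
  match pvRunB pvTrans pvOut 0 port_name.toList with
  | some r => String.ofList r
  | none => port_name

-- ===== PRECONDITION & SPEC =====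
def Spec_shorten_interface_name (port_name : String) (out : String) : Prop := out = shorten_interface_name_alt port_name
instance (port_name : String) (out : String) : Decidable (Spec_shorten_interface_name port_name out) := by unfold Spec_shorten_interface_name; infer_instance

-- ===== CLAIM (what is proved, stated in full; the proofs are below) =====
def Claim_equal_shorten_interface_name : Prop := ∀ (port_name : String), Dom_shorten_interface_name port_name → Spec_shorten_interface_name port_name (shorten_interface_name port_name)

-- ===== LEMMAS AND PROOFS =====
set_option maxRecDepth 100000

-- the trie state reached from q by consuming w (proof-side notion)
def pvStateOf (trans : PySem.Dict (Nat × Char) Nat) (q : Nat) : List Char → Option Nat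
  | [] => some q
  | c :: w =>
    match trans.get? (q, c) with
    | none => none
    | some q' => pvStateOf trans q' w

-- the two tables are the same list
lemma pv_tables_eq : pvReplacements = pvPatterns := rfl

-- concrete facts about the compiled trie, checked by evaluation
-- every pattern's path exists and ends in its shorthand
lemma pv_trie_complete :
    pvPatterns.all (fun p => ((pvStateOf pvTrans 0 p.1).bind (fun q => pvOut.get? q)) == some p.2) = true := by
  decide

-- every accepting state is the state of some pattern
lemma pv_out_states :
    pvOut.items.all (fun qs => pvPatterns.any
      (fun p => (pvStateOf pvTrans 0 p.1 == some qs.1) && (p.2 == qs.2))) = true := by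
  decide

-- the transition table is a tree: targets are distinct and never the root
lemma pv_targets_nodup : (pvTrans.items.map Prod.snd).Nodup := by decide
lemma pv_root_not_target : 0 ∉ pvTrans.items.map Prod.snd := by decide

-- patterns are nonempty and prefix-free
lemma pv_patterns_ne_nil : ∀ p ∈ pvPatterns, p.1 ≠ [] := by decide
lemma pv_prefix_free : ∀ p ∈ pvPatterns, ∀ q ∈ pvPatterns, p.1 <+: q.1 → p = q := by decide

lemma pv_stateOf_append (u : List Char) : ∀ (q : Nat) (v : List Char),
    pvStateOf pvTrans q (u ++ v) = (pvStateOf pvTrans q u).bind (fun r => pvStateOf pvTrans r v) := by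
  induction u with
  | nil => intro q v; simp [pvStateOf]
  | cons c u ih =>
    intro q v
    simp only [List.cons_append, pvStateOf]
    cases pvTrans.get? (q, c) with
    | none => rfl
    | some q' => exact ih q' v

lemma pv_target_ne_zero {k : Nat × Char} {q : Nat} (h : pvTrans.get? k = some q) : q ≠ 0 := by
  intro hq
  exact pv_root_not_target
    (hq ▸ List.mem_map_of_mem (PySem.Dict.mem_items_of_get?_eq_some _ h))

lemma pv_stateOf_zero_eq_nil : ∀ (w : List Char), pvStateOf pvTrans 0 w = some 0 → w = [] := by
  intro w
  induction w using List.reverseRecOn with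
  | nil => intro _; rfl
  | append_singleton u c _ =>
    intro h
    rw [pv_stateOf_append] at h
    cases hu : pvStateOf pvTrans 0 u with
    | none => simp [hu] at h
    | some r =>
      simp only [hu, Option.bind_some, pvStateOf] at h
      cases ht : pvTrans.get? (r, c) with
      | none => simp [ht] at h
      | some q =>
        simp only [ht] at h
        exact absurd (Option.some.inj h) (pv_target_ne_zero ht)

-- targets determine their unique incoming key
lemma pv_key_unique {k k' : Nat × Char} {q : Nat}
    (h : pvTrans.get? k = some q) (h' : pvTrans.get? k' = some q) : k = k' := by
  have m := PySem.Dict.mem_items_of_get?_eq_some _ h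
  have m' := PySem.Dict.mem_items_of_get?_eq_some _ h'
  have heq : ((k, q) : (Nat × Char) × Nat) = (k', q) :=
    List.inj_on_of_nodup_map pv_targets_nodup m m' rfl
  exact congrArg Prod.fst heq

lemma pv_stateOf_inj : ∀ (w : List Char) (q : Nat) (w' : List Char),
    pvStateOf pvTrans 0 w = some q → pvStateOf pvTrans 0 w' = some q → w = w' := by
  intro w
  induction w using List.reverseRecOn with
  | nil =>
    intro q w' h h'
    simp only [pvStateOf] at h
    exact (pv_stateOf_zero_eq_nil w' ((Option.some.inj h) ▸ h')).symm
  | append_singleton u c ih =>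
    intro q w' h h'
    rw [pv_stateOf_append] at h
    cases hu : pvStateOf pvTrans 0 u with
    | none => simp [hu] at h
    | some r =>
      simp only [hu, Option.bind_some, pvStateOf] at h
      cases ht : pvTrans.get? (r, c) with
      | none => simp [ht] at h
      | some qt =>
        simp only [ht] at h
        induction w' using List.reverseRecOn with
        | nil =>
          simp only [pvStateOf] at h'
          rw [← h'] at h
          exact absurd (Option.some.inj h) (pv_target_ne_zero ht)
        | append_singleton u' c' _ =>
          rw [pv_stateOf_append] at h'
          cases hu' : pvStateOf pvTrans 0 u' with
          | none => simp [hu'] at h'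
          | some r' =>
            simp only [hu', Option.bind_some, pvStateOf] at h'
            cases ht' : pvTrans.get? (r', c') with
            | none => simp [ht'] at h'
            | some qt' =>
              simp only [ht'] at h'
              rw [← h'] at h
              have hk : ((r, c) : Nat × Char) = (r', c') :=
                pv_key_unique (h ▸ ht) ht'
              have hk1 : r = r' := congrArg Prod.fst hk
              have hk2 : c = c' := congrArg Prod.snd hk
              rw [← hk1] at hu'
              rw [← hk2, ih r u' hu hu']

-- if the walk returns, some nonempty consumed prefix reached an accepting state
lemma pv_runB_some_spec : ∀ (l : List Char) (q : Nat) (r : List Char),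
    pvRunB pvTrans pvOut q l = some r →
    ∃ u c v qf sh, l = u ++ c :: v ∧ pvStateOf pvTrans q (u ++ [c]) = some qf ∧
      pvOut.get? qf = some sh ∧ r = sh ++ v := by
  intro l
  induction l with
  | nil => intro q r h; simp [pvRunB] at h
  | cons ch rest ih =>
    intro q r h
    simp only [pvRunB] at h
    cases ht : pvTrans.get? (q, ch) with
    | none => simp [ht] at h
    | some st' =>
      rw [ht] at h
      cases ho : pvOut.get? st' with
      | some short =>
        simp only [ho, Option.some.injEq] at h
        refine ⟨[], ch, rest, st', short, rfl, ?_, ho, h.symm⟩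
        simp [pvStateOf, ht]
      | none =>
        simp only [ho] at h
        obtain ⟨u, c, v, qf, sh, hl, hs, hout, hr⟩ := ih st' r h
        refine ⟨ch :: u, c, v, qf, sh, by simp [hl], ?_, hout, hr⟩
        simpa [pvStateOf, ht] using hs

-- if a pattern path matches a prefix of l and no shorter prefix accepts, the walk fires it
lemma pv_runB_match : ∀ (p : List Char) (q : Nat) (l : List Char) (qf : Nat) (sh : List Char),
    p ≠ [] → pvStateOf pvTrans q p = some qf → pvOut.get? qf = some sh → p <+: l →
    (∀ u, u ≠ [] → u <+: p → u ≠ p → (pvStateOf pvTrans q u).bind (fun s => pvOut.get? s) = none) →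
    pvRunB pvTrans pvOut q l = some (sh ++ l.drop p.length) := by
  intro p
  induction p with
  | nil => intro _ _ _ _ h; exact absurd rfl h
  | cons c p' ih =>
    intro q l qf sh _ hs hout hpre hside
    obtain ⟨t, rfl⟩ := hpre
    simp only [pvStateOf] at hs
    cases ht : pvTrans.get? (q, c) with
    | none => simp [ht] at hs
    | some q1 =>
      rw [ht] at hs
      simp only [List.cons_append, pvRunB, ht]
      by_cases hp' : p' = []
      · subst hp'
        simp only [pvStateOf, Option.some.injEq] at hs
        rw [hs]
        simp [hout]
      · have hne : [c] ≠ c :: p' := by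
          simpa using hp'
        have h1 : (pvStateOf pvTrans q [c]).bind (fun s => pvOut.get? s) = none :=
          hside [c] (by simp) ⟨p', rfl⟩ hne
        have h1' : pvOut.get? q1 = none := by
          simpa [pvStateOf, ht] using h1
        simp only [h1']
        have hrec := ih q1 (p' ++ t) qf sh hp' hs hout ⟨t, rfl⟩
          (fun u hu hupre hune => by
            have := hside (c :: u) (by simp) (List.cons_prefix_cons.mpr ⟨rfl, hupre⟩)
              (by simpa using hune)
            simpa [pvStateOf, ht] using this)
        rw [hrec]
        simp

-- Python's find puts a matching prefix at index 0 (A-side helper)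
lemma pv_replaceOnce_prefix (s old new : List Char) (h : old <+: s) :
    pvReplaceOnce s old new = new ++ s.drop old.length := by
  have hfind : PySem.Chars.find s old = 0 := by
    have hne : PySem.Chars.find s old ≠ -1 :=
      (PySem.Chars.find_ne_neg_one_iff _ _).mpr h.isInfix
    have hnn : 0 ≤ PySem.Chars.find s old :=
      (PySem.Chars.find_nonneg_iff _ _).mpr h.isInfix
    have hzero : (PySem.Chars.findFrom s old 0 none) = PySem.Chars.find s old :=
      PySem.Chars.findFrom_zero _ _
    have hne' : PySem.Chars.findFrom s old 0 none ≠ -1 := by rw [hzero]; exact hne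
    obtain ⟨-, -, hmin⟩ :=
      PySem.Chars.findFrom_natCast_spec s old 0 (Nat.zero_le _) hne'
    by_contra hne0
    have hpos : 0 < (PySem.Chars.findFrom s old 0 none).toNat := by
      rw [hzero] at *; omega
    exact hmin 0 (Nat.zero_le _) hpos (by simpa using h)
  simp [pvReplaceOnce, hfind]

-- A's loop when nothing matches
lemma pv_loopA_none (s : String) : ∀ (reps : List (List Char × List Char)),
    (∀ p ∈ reps, ¬ p.1 <+: s.toList) → pvLoopA reps s = s := by
  intro reps
  induction reps with
  | nil => intro _; rfl
  | cons p tl ih =>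
    intro h
    obtain ⟨l, sh⟩ := p
    have hsw : PySem.Chars.startswith s.toList l = false :=
      Bool.eq_false_iff.mpr (fun hb =>
        h (l, sh) List.mem_cons_self ((PySem.Chars.startswith_iff _ _).mp hb))
    simp only [pvLoopA, hsw, Bool.false_eq_true, if_false]
    exact ih (fun p hp => h p (List.mem_cons_of_mem _ hp))

-- A's loop when (p, sh) is the unique match
lemma pv_loopA_match (s : String) (p sh : List Char) :
    ∀ (reps : List (List Char × List Char)), (p, sh) ∈ reps → p <+: s.toList →
    (∀ x ∈ reps, x.1 <+: s.toList → x = (p, sh)) →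
    pvLoopA reps s = String.ofList (sh ++ s.toList.drop p.length) := by
  intro reps
  induction reps with
  | nil => intro h; simp at h
  | cons hd tl ih =>
    intro hmem hpre huniq
    obtain ⟨l0, sh0⟩ := hd
    by_cases hsw : PySem.Chars.startswith s.toList l0 = true
    · have hpre0 : l0 <+: s.toList := (PySem.Chars.startswith_iff _ _).mp hsw
      have hx : ((l0, sh0) : List Char × List Char) = (p, sh) :=
        huniq (l0, sh0) List.mem_cons_self hpre0
      have hx1 : l0 = p := congrArg Prod.fst hx
      have hx2 : sh0 = sh := congrArg Prod.snd hx
      calc pvLoopA ((l0, sh0) :: tl) s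
          = String.ofList (pvReplaceOnce s.toList l0 sh0) := by simp [pvLoopA, hsw]
        _ = String.ofList (sh0 ++ s.toList.drop l0.length) := by
              rw [pv_replaceOnce_prefix _ _ _ hpre0]
        _ = String.ofList (sh ++ s.toList.drop p.length) := by rw [hx1, hx2]
    · have hmem' : (p, sh) ∈ tl := by
        cases List.mem_cons.mp hmem with
        | inl h =>
          have h1 : p = l0 := congrArg Prod.fst h
          exact absurd ((PySem.Chars.startswith_iff _ _).mpr (h1 ▸ hpre)) hsw
        | inr h => exact h
      have hswf : PySem.Chars.startswith s.toList l0 = false := Bool.eq_false_iff.mpr hsw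
      simp only [pvLoopA, hswf, Bool.false_eq_true, if_false]
      exact ih hmem' hpre (fun x hx => huniq x (List.mem_cons_of_mem _ hx))

-- no proper nonempty prefix of a pattern reaches an accepting state
lemma pv_side (p sh : List Char) (hp : (p, sh) ∈ pvPatterns) :
    ∀ u, u ≠ [] → u <+: p → u ≠ p → (pvStateOf pvTrans 0 u).bind (fun s => pvOut.get? s) = none := by
  intro u hune hupre hunep
  cases hsu : pvStateOf pvTrans 0 u with
  | none => rfl
  | some q =>
    simp only [Option.bind_some]
    cases ho : pvOut.get? q with
    | none => rfl
    | some sh' =>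
      exfalso
      have hmem := PySem.Dict.mem_items_of_get?_eq_some _ ho
      have := List.all_eq_true.mp pv_out_states _ hmem
      obtain ⟨p2, hp2mem, hp2⟩ := List.any_eq_true.mp this
      simp only [Bool.and_eq_true, beq_iff_eq] at hp2
      obtain ⟨h1, _⟩ := hp2
      have hst : pvStateOf pvTrans 0 p2.1 = some q := h1
      have : u = p2.1 := pv_stateOf_inj u q p2.1 hsu hst
      have hpp : p2 = (p, sh) := pv_prefix_free p2 hp2mem (p, sh) hp (this ▸ hupre)
      exact hunep (by rw [this, hpp])

-- ===== VERDICT (by name: the statement is the Claim_ definition above) =====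
theorem shorten_interface_name_spec : Claim_equal_shorten_interface_name := by
  intro s _
  unfold Spec_shorten_interface_name shorten_interface_name shorten_interface_name_alt
  by_cases hnil : s.toList = []
  · rw [if_pos hnil, hnil]
    have hs0 : s = "" := by
      rw [← String.ofList_toList (s := s), hnil]
    simp [pvRunB, hs0]
  · rw [if_neg hnil, pv_tables_eq]
    by_cases hmatch : ∃ p ∈ pvPatterns, p.1 <+: s.toList
    · obtain ⟨⟨p, sh⟩, hpmem, hpre⟩ := hmatch
      have huniq : ∀ x ∈ pvPatterns, x.1 <+: s.toList → x = (p, sh) := by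
        intro x hx hxpre
        cases List.prefix_or_prefix_of_prefix hxpre hpre with
        | inl h => exact pv_prefix_free x hx (p, sh) hpmem h
        | inr h => exact (pv_prefix_free (p, sh) hpmem x hx h).symm
      rw [pv_loopA_match s p sh pvPatterns hpmem hpre huniq]
      have hc := List.all_eq_true.mp pv_trie_complete _ hpmem
      have hc' : (pvStateOf pvTrans 0 p).bind (fun q => pvOut.get? q) = some sh := beq_iff_eq.mp hc
      cases hsp : pvStateOf pvTrans 0 p with
      | none => rw [hsp] at hc'; simp at hc'
      | some qf =>
        rw [hsp] at hc'
        simp only [Option.bind_some] at hc'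
        rw [pv_runB_match p 0 s.toList qf sh (pv_patterns_ne_nil _ hpmem) hsp hc' hpre
          (pv_side p sh hpmem)]
    · push Not at hmatch
      rw [pv_loopA_none s pvPatterns hmatch]
      cases hr : pvRunB pvTrans pvOut 0 s.toList with
      | none => rfl
      | some r =>
        exfalso
        obtain ⟨u, c, v, qf, sh, hl, hs, hout, -⟩ := pv_runB_some_spec s.toList 0 r hr
        have hmem := PySem.Dict.mem_items_of_get?_eq_some _ hout
        have := List.all_eq_true.mp pv_out_states _ hmem
        obtain ⟨p2, hp2mem, hp2⟩ := List.any_eq_true.mp this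
        simp only [Bool.and_eq_true, beq_iff_eq] at hp2
        obtain ⟨h1, -⟩ := hp2
        have hst : pvStateOf pvTrans 0 p2.1 = some qf := h1
        have heq : u ++ [c] = p2.1 := pv_stateOf_inj _ qf _ hs hst
        exact hmatch p2 hp2mem (heq ▸ ⟨v, by rw [hl]; simp⟩)
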